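-- pv_equiv track=rewrite | github.com/Ellyriel/GNS3_project | Config_avec_policies/bgp.py | decompose_ip
-- ===== SOURCE A (Python) =====
-- def decompose_ip(ip):
--     '''
--     retourne une liste dont les éléments sont les partis séparées de l'adresse ip avec masque en argument
--     '''
--     ip_decomposee = []
--     indice_precedent = -1
--     # récupère les 8 nombres hexadécimaux de l'adresse dans une liste
--     for i in range (len(ip)):
--         if ip[i] == ":" or ip[i] == "/":
--             groupe = ip[indice_precedent+1:i]
--             ip_decomposee.append(groupe)
--             indice_precedent = i
--     # récupère le masque et le met en position 8 dans la liste ip_decomposee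
--     indice = ip.find("/")
--     masque = ip[indice:]
--     ip_decomposee.append(masque)
--     return ip_decomposee
-- ===== SOURCE B (Python) =====
-- def decompose_ip(ip):
--     # Idiomatic: split on both delimiters with one library call instead of the per-character index scan.
--     parts = ip.replace('/', ':').split(':')
--     parts.pop()  # drop the piece after the final delimiter (A never appends it)
--     parts.append(ip[ip.find('/'):])
--     return parts
-- ===== Notes on version B (the rewrite author's own statement) =====
-- stated objective: idiomatic
-- what changed: Replaces the manual index loop that tracks the previous delimiter and slices out each group with a single library-call pipeline: translate the slash to a colon, split once on the colon, drop the trailing piece, and append the mask slice ip[ip.find('/'):] unchanged.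
import Mathlib
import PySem

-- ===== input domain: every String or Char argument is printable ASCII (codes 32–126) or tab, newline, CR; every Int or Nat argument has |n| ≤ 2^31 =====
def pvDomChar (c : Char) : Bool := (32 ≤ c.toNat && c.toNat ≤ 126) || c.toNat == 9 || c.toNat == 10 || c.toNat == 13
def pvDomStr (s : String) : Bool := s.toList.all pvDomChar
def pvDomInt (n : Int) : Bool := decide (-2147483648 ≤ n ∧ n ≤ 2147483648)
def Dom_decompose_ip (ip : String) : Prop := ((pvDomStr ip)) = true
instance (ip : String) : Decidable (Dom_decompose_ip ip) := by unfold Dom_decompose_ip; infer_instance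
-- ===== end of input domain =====

-- B replaces A's manual index loop (previous-delimiter tracking + slicing) by the idiomatic
-- replace-then-split library pipeline (measured faster by a constant factor: the per-character
-- Python loop disappears); return values proved equal on all inputs.

-- ===== PORT A =====
-- A: index loop over range(len(ip)); on ':' or '/' append ip[prev+1:i] and remember i;
-- finally append ip[ip.find('/'):].
def decompose_ip (ip : String) : List String :=
  let st := (PySem.List.pyRange 0 (PySem.Str.len ip) 1).foldl
    (fun (st : List String × Int) i =>
      if PySem.Str.pyGet? ip i = some ':' ∨ PySem.Str.pyGet? ip i = some '/' then
        (st.1 ++ [PySem.Str.slice ip (some (st.2 + 1)) (some i)], i)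
      else st)
    ([], -1)
  st.1 ++ [PySem.Str.slice ip (some (PySem.Str.find ip "/")) none]

-- ===== PORT B =====
-- B: parts = ip.replace('/',':').split(':'); parts.pop(); parts.append(ip[ip.find('/'):])
def decompose_ip_alt (ip : String) : List String :=
  let parts := (PySem.Chars.splitOn (PySem.Chars.replace ip.toList "/".toList ":".toList) ":".toList).map String.ofList
  parts.dropLast ++ [PySem.Str.slice ip (some (PySem.Str.find ip "/")) none]

-- ===== PRECONDITION & SPEC =====
def Spec_decompose_ip (ip : String) (out : List String) : Prop := out = decompose_ip_alt ip
instance (ip : String) (out : List String) : Decidable (Spec_decompose_ip ip out) := by unfold Spec_decompose_ip; infer_instance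

-- ===== CLAIM (what is proved, stated in full; the proofs are below) =====
def Claim_equal_decompose_ip : Prop := ∀ (ip : String), Dom_decompose_ip ip → Spec_decompose_ip ip (decompose_ip ip)

-- ===== LEMMAS AND PROOFS =====

-- is c one of the two delimiters?
def pvDelim (c : Char) : Bool := c == ':' || c == '/'

-- common spec, scan form: (closed pieces, current open piece)
def pvStep (st : List (List Char) × List Char) (c : Char) : List (List Char) × List Char :=
  if pvDelim c then (st.1 ++ [st.2], []) else (st.1, st.2 ++ [c])

-- common spec, recursive form: split on both delimiters, last piece (possibly empty) kept
def pvSplitD : List Char → List (List Char)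
  | [] => [[]]
  | c :: rest =>
      if pvDelim c then [] :: pvSplitD rest
      else
        match pvSplitD rest with
        | [] => [[c]]
        | s :: ss => (c :: s) :: ss

-- split on ':' only
def pvSplitC : List Char → List (List Char)
  | [] => [[]]
  | c :: rest =>
      if c == ':' then [] :: pvSplitC rest
      else
        match pvSplitC rest with
        | [] => [[c]]
        | s :: ss => (c :: s) :: ss

def pvSub (c : Char) : Char := if c == '/' then ':' else c

def pvConsHead (p : List Char) : List (List Char) → List (List Char)
  | [] => [p]
  | s :: ss => (p ++ s) :: ss

theorem pvSplitD_ne_nil (cs : List Char) : pvSplitD cs ≠ [] := by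
  cases cs with
  | nil => simp [pvSplitD]
  | cons c rest =>
      simp only [pvSplitD]
      split
      · simp
      · cases h : pvSplitD rest <;> simp

theorem pvSplitC_ne_nil (cs : List Char) : pvSplitC cs ≠ [] := by
  cases cs with
  | nil => simp [pvSplitC]
  | cons c rest =>
      simp only [pvSplitC]
      split
      · simp
      · cases h : pvSplitC rest <;> simp

-- ===== B side: replace then split equals pvSplitD =====

theorem pvReplace_go (l : List Char) : ∀ (fuel : Nat) (acc : List Char), l.length ≤ fuel →
    PySem.Chars.replace.go "/".toList ":".toList fuel l acc = acc.reverse ++ l.map pvSub := by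
  induction l with
  | nil => intro fuel acc _; cases fuel <;> simp [PySem.Chars.replace.go]
  | cons c t ih =>
      intro fuel acc hf
      cases fuel with
      | zero => simp at hf
      | succ f =>
        simp only [PySem.Chars.replace.go]
        by_cases hc : c = '/'
        · subst hc
          have hp : List.isPrefixOf "/".toList ('/' :: t) = true := by
            simp [List.isPrefixOf]
          rw [if_pos hp]
          have hd : List.drop "/".toList.length ('/' :: t) = t := by simp
          rw [hd, ih f _ (by simpa using hf)]
          simp [pvSub]
        · rw [if_neg (by simp [List.isPrefixOf]; exact Ne.symm hc), ih f _ (by simpa using hf)]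
          simp [pvSub, hc]

theorem pvReplace_eq (cs : List Char) :
    PySem.Chars.replace cs "/".toList ":".toList = cs.map pvSub := by
  simp only [PySem.Chars.replace]
  rw [if_neg (by simp), pvReplace_go cs cs.length [] (le_refl _)]
  simp

theorem pvSplitOn_go (l : List Char) : ∀ (fuel : Nat) (cur : List Char) (acc : List (List Char)),
    l.length ≤ fuel →
    PySem.Chars.splitOn.go ":".toList fuel l cur acc =
      acc.reverse ++ pvConsHead cur.reverse (pvSplitC l) := by
  induction l with
  | nil =>
      intro fuel cur acc _
      cases fuel <;> simp [PySem.Chars.splitOn.go, pvSplitC, pvConsHead]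
  | cons c t ih =>
      intro fuel cur acc hf
      cases fuel with
      | zero => simp at hf
      | succ f =>
        simp only [PySem.Chars.splitOn.go]
        by_cases hc : c = ':'
        · subst hc
          have hp : List.isPrefixOf ":".toList (':' :: t) = true := by
            simp [List.isPrefixOf]
          rw [if_pos hp]
          have hd : List.drop ":".toList.length (':' :: t) = t := by simp
          rw [hd, ih f _ _ (by simpa using hf)]
          simp only [pvSplitC, if_pos (by simp : (':' == ':') = true)]
          cases h : pvSplitC t with
          | nil => exact absurd h (pvSplitC_ne_nil t)
          | cons s ss => simp [pvConsHead]
        · rw [if_neg (by simp [List.isPrefixOf]; exact Ne.symm hc), ih f _ _ (by simpa using hf)]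
          simp only [pvSplitC, if_neg (by simp [hc] : ¬ (c == ':') = true)]
          cases h : pvSplitC t with
          | nil => exact absurd h (pvSplitC_ne_nil t)
          | cons s ss => simp [pvConsHead]

theorem pvSplitOn_eq (cs : List Char) :
    PySem.Chars.splitOn cs ":".toList = pvSplitC cs := by
  simp only [PySem.Chars.splitOn]
  rw [pvSplitOn_go cs (cs.length + 1) [] [] (by omega)]
  cases h : pvSplitC cs with
  | nil => exact absurd h (pvSplitC_ne_nil cs)
  | cons s ss => simp [pvConsHead]

theorem pvSplitC_map_sub (cs : List Char) : pvSplitC (cs.map pvSub) = pvSplitD cs := by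
  induction cs with
  | nil => simp [pvSplitC, pvSplitD]
  | cons c rest ih =>
      by_cases hc : pvDelim c = true
      · have hs : pvSub c == ':' := by
          simp [pvDelim] at hc
          rcases hc with h | h <;> simp [pvSub, h]
        simp only [List.map_cons, pvSplitC, pvSplitD, if_pos hs, if_pos hc, ih]
      · have hc' : ¬ (c = ':') ∧ ¬ (c = '/') := by
          simp [pvDelim] at hc; exact hc
        have hsc : pvSub c = c := by simp [pvSub, hc'.2]
        have h1 : ¬ (c == ':') = true := by simp [hc'.1]
        simp only [List.map_cons, pvSplitC, pvSplitD, hsc, ih, if_neg h1, if_neg hc]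

-- scan form agrees with recursive form (accumulator-generalised)
theorem pvScanAux (cs : List Char) : ∀ (acc : List (List Char)) (cur : List Char),
    (cs.foldl pvStep (acc, cur)).1 ++ [(cs.foldl pvStep (acc, cur)).2] =
      acc ++ pvConsHead cur (pvSplitD cs) := by
  induction cs with
  | nil => intro acc cur; simp [pvSplitD, pvConsHead]
  | cons c rest ih =>
      intro acc cur
      by_cases hc : pvDelim c = true
      · simp only [List.foldl_cons, pvStep, if_pos hc, ih]
        simp only [pvSplitD, if_pos hc]
        cases h : pvSplitD rest with
        | nil => exact absurd h (pvSplitD_ne_nil rest)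
        | cons s ss => simp [pvConsHead]
      · simp only [List.foldl_cons, pvStep, if_neg hc, ih]
        simp only [pvSplitD, if_neg hc]
        cases h : pvSplitD rest with
        | nil => exact absurd h (pvSplitD_ne_nil rest)
        | cons s ss => simp [pvConsHead]

-- one more character extends a half-open slice by one element
theorem pvSliceSucc (cs : List Char) (q n : Nat) (hq : q ≤ n) (hn : n < cs.length) :
    PySem.List.slice cs (some (q : Int)) (some ((n : Int) + 1)) =
      PySem.List.slice cs (some (q : Int)) (some (n : Int)) ++ [cs[n]] := by
  rw [PySem.List.slice_toNat cs (by omega) (by omega),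
      PySem.List.slice_toNat cs (by omega) (by omega)]
  have h1 : ((n : Int) + 1).toNat = n + 1 := by omega
  have h2 : ((n : Int)).toNat = n := by omega
  have h3 : ((q : Int)).toNat = q := by omega
  rw [h1, h2, h3]
  have h4 : n + 1 - q = (n - q) + 1 := by omega
  rw [h4, List.take_add_one]
  congr 1
  have : (cs.drop q)[n - q]? = some cs[n] := by
    rw [List.getElem?_drop]
    have : q + (n - q) = n := by omega
    rw [this]
    exact List.getElem?_eq_getElem hn
  simp [this]

-- A's index loop computes the scan: after n steps the appended groups are the closed
-- pieces of the scan of the first n characters, and ip[prev+1:n] is the open piece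
theorem pvLoopA (ip : String) (n : Nat) (hn : n ≤ ip.toList.length) :
    ∃ q : Nat, q ≤ n ∧
      (PySem.List.pyRange 0 (n : Int) 1).foldl
        (fun (st : List String × Int) i =>
          if PySem.Str.pyGet? ip i = some ':' ∨ PySem.Str.pyGet? ip i = some '/' then
            (st.1 ++ [PySem.Str.slice ip (some (st.2 + 1)) (some i)], i)
          else st)
        ([], -1)
      = (((ip.toList.take n).foldl pvStep ([], [])).1.map String.ofList, (q : Int) - 1) ∧
      PySem.List.slice ip.toList (some (q : Int)) (some (n : Int)) =
        ((ip.toList.take n).foldl pvStep ([], [])).2 := by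
  induction n with
  | zero =>
      refine ⟨0, le_refl _, ?_, ?_⟩
      · rw [PySem.List.pyRange_one_eq_nil (by omega)]
        simp
      · rw [PySem.List.slice_toNat _ (by omega) (by omega)]
        simp
  | succ n ih =>
      obtain ⟨q, hq, hfold, hslice⟩ := ih (by omega)
      have hn' : n < ip.toList.length := by omega
      have hrng : PySem.List.pyRange 0 ((n : Int) + 1) 1 =
          PySem.List.pyRange 0 (n : Int) 1 ++ [(n : Int)] :=
        PySem.List.pyRange_one_succ_right (by omega)
      have hcast : ((n + 1 : Nat) : Int) = (n : Int) + 1 := by push_cast; ring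
      have hget : PySem.Str.pyGet? ip (n : Int) = some ip.toList[n] := by
        simp only [PySem.Str.pyGet?, PySem.Chars.pyGet?]
        rw [PySem.List.pyGet?_natCast]
        exact List.getElem?_eq_getElem hn'
      have htake : ip.toList.take (n + 1) = ip.toList.take n ++ [ip.toList[n]] := by
        rw [List.take_add_one]
        simp [List.getElem?_eq_getElem hn']
      rw [hcast, hrng, List.foldl_append, hfold, htake, List.foldl_append]
      simp only [List.foldl_cons, List.foldl_nil]
      by_cases hd : pvDelim ip.toList[n] = true
      · have hcond : PySem.Str.pyGet? ip (n : Int) = some ':' ∨ PySem.Str.pyGet? ip (n : Int) = some '/' := by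
          rw [hget]
          simp only [pvDelim, Bool.or_eq_true, beq_iff_eq] at hd
          rcases hd with h | h <;> simp [h]
        refine ⟨n + 1, le_refl _, ?_, ?_⟩
        · rw [if_pos hcond]
          simp only [pvStep, if_pos hd, Prod.mk.injEq]
          refine ⟨?_, by push_cast; ring⟩
          have e1 : (q : Int) - 1 + 1 = (q : Int) := by omega
          rw [e1]
          have e2 : PySem.Str.slice ip (some (q : Int)) (some (n : Int)) =
              String.ofList ((List.foldl pvStep ([], []) (List.take n ip.toList)).2) := by
            simp only [PySem.Str.slice, PySem.Chars.slice, hslice]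
          rw [e2, List.map_append, List.map_cons, List.map_nil]
        · rw [PySem.List.slice_toNat _ (by omega) (by omega)]
          have e1 : ((n : Int) + 1).toNat = n + 1 := by omega
          have e2 : (((n + 1 : Nat)) : Int).toNat = n + 1 := by omega
          simp [pvStep, hd, e1]
      · have hcond : ¬ (PySem.Str.pyGet? ip (n : Int) = some ':' ∨ PySem.Str.pyGet? ip (n : Int) = some '/') := by
          rw [hget]
          simp only [pvDelim, Bool.or_eq_true, beq_iff_eq] at hd
          simp only [Option.some.injEq, not_or]
          exact ⟨fun h => hd (Or.inl h), fun h => hd (Or.inr h)⟩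
        refine ⟨q, by omega, ?_, ?_⟩
        · rw [if_neg hcond]
          simp only [pvStep, if_neg hd]
        · simp only [pvStep, if_neg hd]
          rw [← hslice]
          exact pvSliceSucc ip.toList q n hq hn'

-- ===== VERDICT (by name: the statement is the Claim_ definition above) =====
theorem decompose_ip_spec : Claim_equal_decompose_ip := by
  intro ip _
  unfold Spec_decompose_ip decompose_ip decompose_ip_alt
  obtain ⟨q, hq, hfold, hslice⟩ := pvLoopA ip ip.toList.length (le_refl _)
  have hlen : PySem.Str.len ip = (ip.toList.length : Int) := PySem.Str.len_eq ip
  rw [hlen, hfold]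
  simp only [List.take_length]
  rw [pvReplace_eq, pvSplitOn_eq, pvSplitC_map_sub]
  congr 1
  have hsc := pvScanAux ip.toList [] []
  simp only [List.nil_append] at hsc
  cases h : pvSplitD ip.toList with
  | nil => exact absurd h (pvSplitD_ne_nil _)
  | cons s ss =>
      rw [h] at hsc
      simp only [pvConsHead, List.nil_append] at hsc
      rw [← hsc, List.map_append, List.map_cons, List.map_nil, List.dropLast_concat]
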